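-- pv_equiv track=rewrite | github.com/TalonT-Org/AutoSkillit | src/autoskillit/recipe/_analysis_bfs.py | _bfs_capped
-- ===== SOURCE A (Python) =====
-- def _bfs_capped(
--     graph: dict[str, set[str]],
--     start_nodes: set[str],
--     barrier_nodes: set[str],
-- ) -> set[str]:
--     """BFS from start_nodes, visiting but not expanding barrier_nodes.
--
--     Used to find steps reachable from a starting set where certain steps
--     (re-capture barriers) reset a variable's provenance — steps reachable
--     only through a barrier are excluded from the result's expansion.
--
--     Returns all visited nodes (including barrier_nodes that were reached).
--     """
--     visited: set[str] = set()
--     queue = list(start_nodes)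
--     while queue:
--         node = queue.pop()
--         if node in visited:
--             continue
--         visited.add(node)
--         if node in barrier_nodes:
--             continue  # Reached but do not expand — variable is refreshed here
--         queue.extend(graph.get(node, set()))
--     return visited
-- ===== SOURCE B (Python) =====
-- def _bfs_capped(
--     graph: dict[str, set[str]],
--     start_nodes: set[str],
--     barrier_nodes: set[str],
-- ) -> set[str]:
--     """Recursive DFS from start_nodes; barrier nodes are reached but not expanded.
--
--     A node's successors are its neighbours unless it is a barrier, in which
--     case it has none.  Returns the set of all visited nodes.
--     """
--     visited: set[str] = set()
--
--     def successors(node: str):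
--         return () if node in barrier_nodes else graph.get(node, ())
--
--     def dfs(node: str) -> None:
--         if node not in visited:
--             visited.add(node)
--             for nb in successors(node):
--                 dfs(nb)
--
--     for s in start_nodes:
--         dfs(s)
--     return visited
-- ===== Notes on version B (the rewrite author's own statement) =====
-- stated objective: simpler
-- what changed: Replaces the explicit worklist stack and its while-loop by a nested recursive dfs(node) with a successors(node) helper (empty for barrier nodes), so the hand-managed queue, the pop, and the duplicated continue-branches disappear; the returned visited set is identical.
import Mathlib
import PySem

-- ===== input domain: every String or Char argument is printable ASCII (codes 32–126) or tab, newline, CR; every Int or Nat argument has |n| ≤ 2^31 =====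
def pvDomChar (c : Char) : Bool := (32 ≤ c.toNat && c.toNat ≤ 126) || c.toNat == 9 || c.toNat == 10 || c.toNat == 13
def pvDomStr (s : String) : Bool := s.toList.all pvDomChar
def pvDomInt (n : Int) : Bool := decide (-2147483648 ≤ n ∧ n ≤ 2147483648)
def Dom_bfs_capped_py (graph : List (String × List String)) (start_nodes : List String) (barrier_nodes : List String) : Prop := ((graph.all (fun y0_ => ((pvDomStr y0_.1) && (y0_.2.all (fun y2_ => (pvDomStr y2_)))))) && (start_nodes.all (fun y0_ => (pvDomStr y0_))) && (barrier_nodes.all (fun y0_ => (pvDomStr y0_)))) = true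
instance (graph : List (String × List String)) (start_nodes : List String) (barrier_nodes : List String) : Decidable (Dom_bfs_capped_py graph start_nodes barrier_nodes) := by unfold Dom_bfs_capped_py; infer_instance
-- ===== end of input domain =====

-- B replaces A's explicit-stack while-loop by a recursive DFS with a successors helper
-- (simpler decomposition, same visited set); the set is rendered as its insertion-order list.

-- graph.get(node, set()) — first-match association-list lookup (PySem.Dict).
def pvNbrs (graph : List (String × List String)) (node : String) : List String :=
  PySem.Dict.getD (PySem.Dict.mk graph) node []

-- ===== PORT A =====
-- A's while-loop over the Python list `queue`. Python iterates its set arguments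
-- (`list(start_nodes)`, `queue.extend(graph.get(node, set()))`) in unspecified hash
-- order; this port fixes a concrete order — the stack is kept head-first (head = top)
-- and receives the input lists as given. The returned value is a set, so order-free.
-- The Nat argument is a fuel guard only: the fuel passed below provably never runs out
-- (each iteration pops one element; total pushes ≤ Σ |adjacency lists|).
def bfsLoopA (graph : List (String × List String)) (barrier : List String) :
    Nat → List String → List String → List String
  | 0, visited, _ => visited
  | fa + 1, visited, stack =>
    match stack with
    | [] => visited
    | node :: rest =>
      if node ∈ visited then bfsLoopA graph barrier fa visited rest
      else
        -- visited.add(node): node ∉ visited here, so add = append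
        let v1 := visited ++ [node]
        if node ∈ barrier then bfsLoopA graph barrier fa v1 rest
        else bfsLoopA graph barrier fa v1 (pvNbrs graph node ++ rest)

def bfs_capped_py (graph : List (String × List String)) (start_nodes : List String) (barrier_nodes : List String) : List String :=
  bfsLoopA graph barrier_nodes
    (start_nodes.length + (graph.map (fun p => p.2.length)).sum + 1)
    [] start_nodes

-- ===== PORT B =====
-- Source B's `successors(node)`: empty for a barrier node, else the adjacency lookup.
def pvSucc (graph : List (String × List String)) (barrier : List String) (node : String) :
    List String :=
  if node ∈ barrier then [] else pvNbrs graph node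

-- Source B's nested `dfs(node)`: mutates `visited`; here it returns the updated visited list.
-- The Nat argument is a fuel guard only (plain recursion in Source B): the depth of nested
-- visiting calls is bounded by the number of distinct reachable nodes, so the fuel
-- passed below provably never runs out.
def dfsB (graph : List (String × List String)) (barrier : List String) :
    Nat → List String → String → List String
  | 0, visited, _ => visited
  | f + 1, visited, node =>
    if node ∈ visited then visited
    else (pvSucc graph barrier node).foldl
      (fun v nb => dfsB graph barrier f v nb) (visited ++ [node])

def bfs_capped_py_alt (graph : List (String × List String)) (start_nodes : List String) (barrier_nodes : List String) : List String :=
  start_nodes.foldl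
    (fun v s =>
      dfsB graph barrier_nodes ((start_nodes ++ graph.flatMap (fun p => p.2)).length + 1) v s)
    []

-- ===== PRECONDITION & SPEC =====
def Spec_bfs_capped_py (graph : List (String × List String)) (start_nodes : List String) (barrier_nodes : List String) (out : List String) : Prop := out = bfs_capped_py_alt graph start_nodes barrier_nodes
instance (graph : List (String × List String)) (start_nodes : List String) (barrier_nodes : List String) (out : List String) : Decidable (Spec_bfs_capped_py graph start_nodes barrier_nodes out) := by unfold Spec_bfs_capped_py; infer_instance

-- ===== CLAIM (what is proved, stated in full; the proofs are below) =====
def Claim_equal_bfs_capped_py : Prop := ∀ (graph : List (String × List String)) (start_nodes : List String) (barrier_nodes : List String), Dom_bfs_capped_py graph start_nodes barrier_nodes → Spec_bfs_capped_py graph start_nodes barrier_nodes (bfs_capped_py graph start_nodes barrier_nodes)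

-- ===== LEMMAS AND PROOFS =====

-- number of universe elements not yet visited (termination measure of the traversal)
def pvMu (U v : List String) : Nat := (U.filter (fun u => !decide (u ∈ v))).length

-- total length of the adjacency lists of not-yet-visited keys (bounds A's future pushes)
def pvPot (graph : List (String × List String)) (v : List String) : Nat :=
  ((graph.filter (fun p => !decide (p.1 ∈ v))).map (fun p => p.2.length)).sum

lemma pvNbrs_nil (x : String) : pvNbrs [] x = [] := rfl

lemma pvNbrs_cons (rest : List (String × List String)) (p : String × List String) (x : String) :
    pvNbrs (p :: rest) x = if p.1 = x then p.2 else pvNbrs rest x := by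
  obtain ⟨k, vs⟩ := p
  by_cases h : k = x
  · simp [pvNbrs, PySem.Dict.getD, PySem.Dict.get?_mk_cons, h]
  · simp [pvNbrs, PySem.Dict.getD, PySem.Dict.get?_mk_cons, h]

lemma pvNbrs_subset (graph : List (String × List String)) (node : String) :
    ∀ y ∈ pvNbrs graph node, y ∈ graph.flatMap (fun p => p.2) := by
  induction graph with
  | nil => intro y hy; rw [pvNbrs_nil] at hy; simp at hy
  | cons p rest ih =>
    intro y hy
    rw [pvNbrs_cons] at hy
    by_cases h : p.1 = node
    · rw [if_pos h] at hy
      exact List.mem_flatMap.2 ⟨p, List.mem_cons_self .., hy⟩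
    · rw [if_neg h] at hy
      rcases List.mem_flatMap.1 (ih y hy) with ⟨q, hq, hyq⟩
      exact List.mem_flatMap.2 ⟨q, List.mem_cons_of_mem _ hq, hyq⟩

lemma pvMu_cons (U' v : List String) (u : String) :
    pvMu (u :: U') v = pvMu U' v + (if u ∈ v then 0 else 1) := by
  by_cases h : u ∈ v <;> simp [pvMu, h]

lemma pvMu_le (U v w : List String) (h : ∀ y ∈ v, y ∈ w) : pvMu U w ≤ pvMu U v := by
  induction U with
  | nil => simp [pvMu]
  | cons u U' ih =>
    rw [pvMu_cons, pvMu_cons]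
    by_cases hv : u ∈ v
    · have hw : u ∈ w := h u hv
      simp only [hv, hw, if_true]; omega
    · by_cases hw : u ∈ w <;> simp only [hv, hw, if_true, if_false] <;> omega

lemma pvMu_lt (U v : List String) (x : String) (hx : x ∈ U) (hnv : x ∉ v) :
    pvMu U (v ++ [x]) < pvMu U v := by
  induction U with
  | nil => simp at hx
  | cons u U' ih =>
    rw [pvMu_cons, pvMu_cons]
    have hle : pvMu U' (v ++ [x]) ≤ pvMu U' v :=
      pvMu_le U' v (v ++ [x]) (fun y hy => List.mem_append_left _ hy)
    by_cases hux : u = x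
    · have h1 : u ∈ v ++ [x] := List.mem_append_right _ (by simp [hux])
      simp only [h1, if_true, if_neg (hux ▸ hnv)]
      omega
    · have hx' : x ∈ U' := by
        rcases List.mem_cons.1 hx with h | h
        · exact absurd h.symm hux
        · exact h
      have hiff : u ∈ v ++ [x] ↔ u ∈ v := by
        constructor
        · intro h; rcases List.mem_append.1 h with h | h
          · exact h
          · exact absurd (List.mem_singleton.1 h) hux
        · exact List.mem_append_left _
      have := ih hx'
      by_cases hv : u ∈ v
      · simp only [hv, hiff.2 hv, if_true]; omega
      · have h2 : u ∉ v ++ [x] := fun h => hv (hiff.1 h)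
        simp only [if_neg h2, if_neg hv]; omega

lemma pvPot_cons (rest : List (String × List String)) (v : List String) (p : String × List String) :
    pvPot (p :: rest) v = (if p.1 ∈ v then 0 else p.2.length) + pvPot rest v := by
  by_cases h : p.1 ∈ v <;> simp [pvPot, h]

lemma pvPot_le (graph : List (String × List String)) (v w : List String)
    (h : ∀ y ∈ v, y ∈ w) : pvPot graph w ≤ pvPot graph v := by
  induction graph with
  | nil => simp [pvPot]
  | cons p rest ih =>
    rw [pvPot_cons, pvPot_cons]
    by_cases hv : p.1 ∈ v
    · simp only [hv, h _ hv, if_true]; omega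
    · by_cases hw : p.1 ∈ w <;> simp only [hv, hw, if_true, if_false] <;> omega

lemma pvPot_step (graph : List (String × List String)) (v : List String) (x : String)
    (hnv : x ∉ v) :
    pvPot graph (v ++ [x]) + (pvNbrs graph x).length ≤ pvPot graph v := by
  induction graph with
  | nil => simp [pvPot, pvNbrs_nil]
  | cons p rest ih =>
    rw [pvPot_cons, pvPot_cons, pvNbrs_cons]
    by_cases hpx : p.1 = x
    · have h1 : p.1 ∈ v ++ [x] := List.mem_append_right _ (by simp [hpx])
      have h2 : p.1 ∉ v := hpx ▸ hnv
      have hle : pvPot rest (v ++ [x]) ≤ pvPot rest v :=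
        pvPot_le rest v (v ++ [x]) (fun y hy => List.mem_append_left _ hy)
      simp only [h1, if_true, if_neg h2, if_pos hpx]
      omega
    · have hiff : p.1 ∈ v ++ [x] ↔ p.1 ∈ v := by
        constructor
        · intro h; rcases List.mem_append.1 h with h | h
          · exact h
          · exact absurd (List.mem_singleton.1 h) hpx
        · exact List.mem_append_left _
      rw [if_neg hpx]
      by_cases hv : p.1 ∈ v
      · simp only [hv, hiff.2 hv, if_true]; omega
      · simp only [if_neg (fun h => hv (hiff.1 h)), if_neg hv]; omega

lemma dfsB_mono (graph : List (String × List String)) (barrier : List String) :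
    ∀ (f : Nat) (v : List String) (x y : String), y ∈ v → y ∈ dfsB graph barrier f v x := by
  intro f
  induction f with
  | zero => intro v x y hy; simpa [dfsB] using hy
  | succ f ih =>
    have hfold : ∀ (ns : List String) (v : List String) (y : String),
        y ∈ v → y ∈ ns.foldl (fun v nb => dfsB graph barrier f v nb) v := by
      intro ns
      induction ns with
      | nil => intro v y hy; simpa using hy
      | cons n ns' ihn => intro v y hy; exact ihn _ _ (ih v n y hy)
    intro v x y hy
    simp only [dfsB]
    by_cases hxv : x ∈ v
    · simpa [hxv] using hy
    · simp only [hxv, if_false]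
      exact hfold _ _ _ (List.mem_append_left _ hy)

lemma dfsB_fold_mono (graph : List (String × List String)) (barrier : List String)
    (f : Nat) (ns : List String) :
    ∀ (v : List String) (y : String), y ∈ v →
      y ∈ ns.foldl (fun v nb => dfsB graph barrier f v nb) v := by
  induction ns with
  | nil => intro v y hy; simpa using hy
  | cons n ns' ih => intro v y hy; exact ih _ _ (dfsB_mono graph barrier f v n y hy)

-- fuel irrelevance: with enough fuel, the fold of dfsB does not depend on the exact fuel
lemma dfsB_fuel (graph : List (String × List String)) (barrier : List String) (U : List String)
    (hU : ∀ node, ∀ y ∈ pvNbrs graph node, y ∈ U) :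
    ∀ (n : Nat) (v ns : List String) (f g : Nat),
      pvMu U v ≤ n → pvMu U v < f → pvMu U v < g → (∀ x ∈ ns, x ∈ U) →
      ns.foldl (fun v nb => dfsB graph barrier f v nb) v
        = ns.foldl (fun v nb => dfsB graph barrier g v nb) v := by
  intro n
  induction n with
  | zero =>
    intro v ns f g hn hf hg hns
    induction ns with
    | nil => rfl
    | cons x rest ihs =>
      have hxU : x ∈ U := hns x (List.mem_cons_self ..)
      have hxv : x ∈ v := by
        by_contra hxv
        have := pvMu_lt U v x hxU hxv
        omega
      obtain ⟨f', rfl⟩ : ∃ f', f = f' + 1 := ⟨f - 1, by omega⟩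
      obtain ⟨g', rfl⟩ : ∃ g', g = g' + 1 := ⟨g - 1, by omega⟩
      simp only [List.foldl_cons, dfsB, hxv, if_true]
      exact ihs (fun x hx => hns x (List.mem_cons_of_mem _ hx))
  | succ n ihn =>
    intro v ns f g hn hf hg hns
    induction ns with
    | nil => rfl
    | cons x rest ihs =>
      have hxU : x ∈ U := hns x (List.mem_cons_self ..)
      have hrest : ∀ x ∈ rest, x ∈ U := fun x hx => hns x (List.mem_cons_of_mem _ hx)
      obtain ⟨f', rfl⟩ : ∃ f', f = f' + 1 := ⟨f - 1, by omega⟩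
      obtain ⟨g', rfl⟩ : ∃ g', g = g' + 1 := ⟨g - 1, by omega⟩
      simp only [List.foldl_cons, dfsB]
      by_cases hxv : x ∈ v
      · simp only [hxv, if_true]
        exact ihs hrest
      · have hmu1 : pvMu U (v ++ [x]) < pvMu U v := pvMu_lt U v x hxU hxv
        simp only [hxv, if_false]
        have hsuccU : ∀ y ∈ pvSucc graph barrier x, y ∈ U := by
          intro y hy
          unfold pvSucc at hy
          by_cases hxb : x ∈ barrier
          · rw [if_pos hxb] at hy; simp at hy
          · rw [if_neg hxb] at hy; exact hU x y hy
        have hinner :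
            (pvSucc graph barrier x).foldl (fun v nb => dfsB graph barrier f' v nb) (v ++ [x])
              = (pvSucc graph barrier x).foldl (fun v nb => dfsB graph barrier g' v nb) (v ++ [x]) :=
          ihn (v ++ [x]) _ f' g' (by omega) (by omega) (by omega) hsuccU
        rw [hinner]
        set w := (pvSucc graph barrier x).foldl (fun v nb => dfsB graph barrier g' v nb) (v ++ [x]) with hw
        have hwsub : ∀ y ∈ v ++ [x], y ∈ w :=
          fun y hy => dfsB_fold_mono graph barrier g' _ _ y hy
        have hmw : pvMu U w ≤ pvMu U (v ++ [x]) := pvMu_le U (v ++ [x]) w hwsub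
        exact ihn w rest (f' + 1) (g' + 1) (by omega) (by omega) (by omega) hrest

-- the main correspondence: A's stack loop computes B's fold of recursive dfs calls
lemma bfs_main (graph : List (String × List String)) (barrier : List String) (U : List String)
    (hU : ∀ node, ∀ y ∈ pvNbrs graph node, y ∈ U) :
    ∀ (fa : Nat) (v s : List String) (f : Nat),
      (∀ x ∈ s, x ∈ U) → s.length + pvPot graph v ≤ fa → pvMu U v < f →
      bfsLoopA graph barrier fa v s
        = s.foldl (fun v x => dfsB graph barrier f v x) v := by
  intro fa
  induction fa with
  | zero =>
    intro v s f hs hfa hf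
    have : s = [] := List.length_eq_zero_iff.1 (by omega)
    subst this; rfl
  | succ fa ih =>
    intro v s f hs hfa hf
    match s with
    | [] => rfl
    | x :: rest =>
      have hxU : x ∈ U := hs x (List.mem_cons_self ..)
      have hrest : ∀ y ∈ rest, y ∈ U := fun y hy => hs y (List.mem_cons_of_mem _ hy)
      obtain ⟨f', rfl⟩ : ∃ f', f = f' + 1 := ⟨f - 1, by omega⟩
      simp only [bfsLoopA, List.foldl_cons, dfsB]
      by_cases hxv : x ∈ v
      · simp only [hxv, if_true]
        exact ih v rest (f' + 1) hrest (by simp at hfa ⊢; omega) hf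
      · have hmu1 : pvMu U (v ++ [x]) < pvMu U v := pvMu_lt U v x hxU hxv
        by_cases hxb : x ∈ barrier
        · have hsucc : pvSucc graph barrier x = [] := by simp [pvSucc, hxb]
          simp only [hxv, if_false, hxb, if_true, hsucc, List.foldl_nil]
          have hpot : pvPot graph (v ++ [x]) ≤ pvPot graph v :=
            pvPot_le graph v (v ++ [x]) (fun y hy => List.mem_append_left _ hy)
          exact ih (v ++ [x]) rest (f' + 1) hrest (by simp at hfa ⊢; omega) (by omega)
        · have hsucc : pvSucc graph barrier x = pvNbrs graph x := by simp [pvSucc, hxb]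
          simp only [hxv, if_false, hxb, if_false, hsucc]
          have hpot := pvPot_step graph v x hxv
          have hall : ∀ y ∈ pvNbrs graph x ++ rest, y ∈ U := by
            intro y hy
            rcases List.mem_append.1 hy with hy | hy
            · exact hU x y hy
            · exact hrest y hy
          have := ih (v ++ [x]) (pvNbrs graph x ++ rest) (f' + 1) hall
            (by simp at hfa ⊢; omega) (by omega)
          rw [this, List.foldl_append]
          congr 1
          exact dfsB_fuel graph barrier U hU (pvMu U (v ++ [x])) (v ++ [x])
            (pvNbrs graph x) (f' + 1) f' le_rfl (by omega) (by omega)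
            (fun y hy => hU x y hy)

-- ===== VERDICT (by name: the statement is the Claim_ definition above) =====
theorem bfs_capped_py_spec : Claim_equal_bfs_capped_py := by
  intro graph start_nodes barrier_nodes _
  unfold Spec_bfs_capped_py bfs_capped_py bfs_capped_py_alt
  have hU : ∀ node, ∀ y ∈ pvNbrs graph node,
      y ∈ start_nodes ++ graph.flatMap (fun p => p.2) := by
    intro node y hy
    exact List.mem_append_right _ (pvNbrs_subset graph node y hy)
  apply bfs_main graph barrier_nodes (start_nodes ++ graph.flatMap (fun p => p.2)) hU
  · intro x hx
    exact List.mem_append_left _ hx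
  · have hpot : pvPot graph [] ≤ (graph.map (fun p => p.2.length)).sum := by
      simp [pvPot]
    omega
  · have : pvMu (start_nodes ++ graph.flatMap (fun p => p.2)) []
        ≤ (start_nodes ++ graph.flatMap (fun p => p.2)).length := by
      simp [pvMu]
    omega
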